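-- pv_equiv track=rewrite | github.com/billypery/rosalind-exercises | reccurance_relation/calc_reccurance_relation.py | get_total_rabbit_num
-- ===== SOURCE A (Python) =====
-- def get_total_rabbit_num(months,pairs):
--     range_months = range(1,months+1)
--     total_rabbit_for_each_month = {}
--     for month in range_months:
--         if month == 1 or month == 2:
--             total_rabbit_for_each_month[month] = 1
--         else:
--             total_rabbit_for_each_month[month] = (pairs*total_rabbit_for_each_month[month-2])+ (total_rabbit_for_each_month[month-1])
--     return total_rabbit_for_each_month
-- ===== SOURCE B (Python) =====
-- def get_total_rabbit_num(months, pairs):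
--     # Telescoping the recurrence F(m) = F(m-1) + pairs*F(m-2) gives
--     # F(m) = 1 + pairs * (F(1) + F(2) + ... + F(m-2)),
--     # so each month's count is a closed formula in the RUNNING TOTAL of all
--     # populations up to two months back; B maintains that one prefix sum.
--     total_rabbit_for_each_month = {}
--     running = 0  # sum of the counts for months 1 .. month-2
--     for month in range(1, months + 1):
--         total_rabbit_for_each_month[month] = 1 + pairs * running
--         if month >= 2:
--             running += total_rabbit_for_each_month[month - 1]
--     return total_rabbit_for_each_month
-- ===== Notes on version B (the rewrite author's own statement) =====
-- stated objective: alternative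
-- what changed: B replaces the two-term recurrence lookups by the telescoped identity F(m) = 1 + pairs * (sum of the populations of months 1..m-2): it maintains a single running prefix sum of all previous counts and computes each month's entry by that closed per-entry formula, instead of reading the previous two table entries.
import Mathlib
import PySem

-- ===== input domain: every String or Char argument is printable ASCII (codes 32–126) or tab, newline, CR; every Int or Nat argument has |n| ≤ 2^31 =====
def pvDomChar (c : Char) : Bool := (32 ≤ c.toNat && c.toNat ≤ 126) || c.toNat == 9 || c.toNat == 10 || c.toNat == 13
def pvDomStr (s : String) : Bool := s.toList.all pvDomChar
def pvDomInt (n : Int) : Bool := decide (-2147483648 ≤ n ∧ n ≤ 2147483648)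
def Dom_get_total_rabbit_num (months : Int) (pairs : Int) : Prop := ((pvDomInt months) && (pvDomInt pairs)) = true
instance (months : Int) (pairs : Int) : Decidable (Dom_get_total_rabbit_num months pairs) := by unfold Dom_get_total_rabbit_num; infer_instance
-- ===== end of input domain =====

-- B computes each month's count by the telescoped identity F(m) = 1 + pairs * (sum of months 1..m-2),
-- maintaining one running prefix sum instead of reading the previous two table entries (objective: alternative).

-- ===== PORT A =====
-- A's dict lookups d[month-2]/d[month-1] are ported as getD _ 0; the keys are always
-- present when that branch runs (months 1..month-1 were inserted first), so this is exact.
def get_total_rabbit_num (months : Int) (pairs : Int) : List (Int × Int) :=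
  ((PySem.List.pyRange 1 (months + 1) 1).foldl
    (fun d month =>
      if month == 1 || month == 2 then d.insert month 1
      else d.insert month (pairs * d.getD (month - 2) 0 + d.getD (month - 1) 0))
    (PySem.Dict.empty : PySem.Dict Int Int)).items

-- ===== PORT B =====
-- Source B's for-loop, as structural recursion over the month list with state (dict, running);
-- B's read total[month-1] is ported as getD _ 0 (the key was inserted on the previous iteration).
def pvAltGo (pairs : Int) : List Int → PySem.Dict Int Int → Int → PySem.Dict Int Int
  | [], d, _ => d
  | m :: ms, d, running =>
      let d' := d.insert m (1 + pairs * running)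
      pvAltGo pairs ms d' (if 2 ≤ m then running + d'.getD (m - 1) 0 else running)

def get_total_rabbit_num_alt (months : Int) (pairs : Int) : List (Int × Int) :=
  (pvAltGo pairs (PySem.List.pyRange 1 (months + 1) 1) PySem.Dict.empty 0).items

-- ===== PRECONDITION & SPEC =====
def Spec_get_total_rabbit_num (months : Int) (pairs : Int) (out : List (Int × Int)) : Prop := out = get_total_rabbit_num_alt months pairs
instance (months : Int) (pairs : Int) (out : List (Int × Int)) : Decidable (Spec_get_total_rabbit_num months pairs out) := by unfold Spec_get_total_rabbit_num; infer_instance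

-- ===== CLAIM (what is proved, stated in full; the proofs are below) =====
def Claim_equal_get_total_rabbit_num : Prop := ∀ (months : Int) (pairs : Int), Dom_get_total_rabbit_num months pairs → Spec_get_total_rabbit_num months pairs (get_total_rabbit_num months pairs)

-- ===== LEMMAS AND PROOFS =====

-- the Fibonacci-like sequence: pvF pairs i = population in month i+1
def pvF (pairs : Int) : Nat → Int
  | 0 => 1
  | 1 => 1
  | n + 2 => pairs * pvF pairs n + pvF pairs (n + 1)

-- prefix sums of the sequence
def pvS (pairs : Int) (n : Nat) : Int := ((List.range n).map (pvF pairs)).sum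

-- the table after n months, as an explicit dict
def pvTbl (pairs : Int) (n : Nat) : PySem.Dict Int Int :=
  PySem.Dict.mk ((List.range n).map (fun (i : Nat) => ((i : Int) + 1, pvF pairs i)))

theorem pvTbl_keys (pairs : Int) (n : Nat) :
    (pvTbl pairs n).keys = (List.range n).map (fun (i : Nat) => ((i : Int) + 1)) := by
  simp [pvTbl, PySem.Dict.keys, List.map_map, Function.comp]

theorem pvTbl_keys_nodup (pairs : Int) (n : Nat) : (pvTbl pairs n).keys.Nodup := by
  rw [pvTbl_keys]
  exact List.Nodup.map (fun a b h => by omega) (List.nodup_range)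

theorem pvTbl_getD (pairs : Int) (n i : Nat) (hi : i < n) :
    (pvTbl pairs n).getD ((i : Int) + 1) 0 = pvF pairs i := by
  have hmem : (((i : Int) + 1, pvF pairs i)) ∈ (pvTbl pairs n).items := by
    simp only [pvTbl]
    exact List.mem_map.mpr ⟨i, List.mem_range.mpr hi, rfl⟩
  exact PySem.Dict.getD_of_mem_items _ hmem (pvTbl_keys_nodup pairs n) 0

theorem pvTbl_not_contains (pairs : Int) (n : Nat) :
    (pvTbl pairs n).contains ((n : Int) + 1) = false := by
  rw [PySem.Dict.contains_eq_decide_mem_keys, pvTbl_keys]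
  simp only [decide_eq_false_iff_not, List.mem_map, List.mem_range]
  rintro ⟨i, hi, h⟩
  omega

theorem pvTbl_succ (pairs : Int) (n : Nat) :
    pvTbl pairs (n + 1) = (pvTbl pairs n).insert ((n : Int) + 1) (pvF pairs n) := by
  apply PySem.Dict.ext
  rw [PySem.Dict.items_insert_of_not_contains]
  · simp [pvTbl, List.range_succ]
  · exact pvTbl_not_contains pairs n

-- A's fold builds pvTbl
theorem pvA_fold (pairs : Int) (n : Nat) :
    (PySem.List.pyRange 1 ((n : Int) + 1) 1).foldl
      (fun d month =>
        if month == 1 || month == 2 then d.insert month 1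
        else d.insert month (pairs * d.getD (month - 2) 0 + d.getD (month - 1) 0))
      (PySem.Dict.empty : PySem.Dict Int Int) = pvTbl pairs n := by
  induction n with
  | zero =>
    rw [PySem.List.pyRange_one_eq_nil (by omega)]
    rfl
  | succ n ih =>
    have hc : (((n + 1 : Nat) : Int) + 1) = ((n : Int) + 1) + 1 := by push_cast; ring
    rw [hc, PySem.List.pyRange_one_succ_right (by omega), List.foldl_append, ih]
    simp only [List.foldl_cons, List.foldl_nil]
    match n with
    | 0 => norm_num [pvTbl_succ, pvF]
    | 1 => norm_num [pvTbl_succ, pvF]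
    | (m + 2) =>
      have h12 : ((((m : Nat) + 2 : Nat) : Int) + 1 == 1 || (((m : Nat) + 2 : Nat) : Int) + 1 == 2) = false := by
        push_cast; simp only [beq_eq_false_iff_ne, Bool.or_eq_false_iff]; constructor <;> intro h <;> omega
      rw [h12]
      simp only [Bool.false_eq_true, if_false]
      have e2 : ((((m : Nat) + 2 : Nat) : Int) + 1) - 2 = ((m : Int)) + 1 := by push_cast; ring
      have e1 : ((((m : Nat) + 2 : Nat) : Int) + 1) - 1 = (((m + 1 : Nat) : Int)) + 1 := by push_cast; ring
      rw [e2, e1, pvTbl_getD pairs (m + 2) m (by omega), pvTbl_getD pairs (m + 2) (m + 1) (by omega),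
          pvTbl_succ pairs (m + 2)]
      rfl

-- the telescoped identity B relies on: F(i+1) = 1 + pairs * S(i-1)  (Nat subtraction)
theorem pvF_closed (pairs : Int) : ∀ i : Nat, pvF pairs i = 1 + pairs * pvS pairs (i - 1)
  | 0 => by simp [pvF, pvS]
  | 1 => by simp [pvF, pvS]
  | (n + 2) => by
      have ih := pvF_closed pairs (n + 1)
      have hs : pvS pairs (n + 2 - 1) = pvS pairs (n + 1 - 1) + pvF pairs n := by
        have e1 : (n + 2 - 1 : Nat) = n + 1 := by omega
        have e2 : (n + 1 - 1 : Nat) = n := by omega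
        rw [e1, e2]
        simp [pvS, List.range_succ]
      show pairs * pvF pairs n + pvF pairs (n + 1) = 1 + pairs * pvS pairs (n + 2 - 1)
      rw [hs, ih]
      ring

-- B's recursion builds the same table, generalized over the starting month
theorem pvB_go (pairs : Int) (m : Nat) : ∀ (k : Nat),
    pvAltGo pairs (PySem.List.pyRange ((k : Int) + 1) ((k : Int) + 1 + (m : Int)) 1)
      (pvTbl pairs k) (pvS pairs (k - 1)) = pvTbl pairs (k + m) := by
  induction m with
  | zero =>
    intro k
    rw [PySem.List.pyRange_one_eq_nil (by omega)]
    rfl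
  | succ m ih =>
    intro k
    rw [PySem.List.pyRange_one_cons (by push_cast; omega)]
    simp only [pvAltGo]
    have hins : (pvTbl pairs k).insert ((k : Int) + 1) (1 + pairs * pvS pairs (k - 1))
        = pvTbl pairs (k + 1) := by
      rw [← pvF_closed, pvTbl_succ]
    rw [hins]
    have hr : (if 2 ≤ (k : Int) + 1 then pvS pairs (k - 1) + (pvTbl pairs (k + 1)).getD ((k : Int) + 1 - 1) 0
        else pvS pairs (k - 1)) = pvS pairs ((k + 1) - 1) := by
      match k with
      | 0 => norm_num
      | (j + 1) =>
        rw [if_pos (by push_cast; omega)]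
        have hk : (((j + 1 : Nat) : Int) + 1 - 1) = ((j : Int) + 1) := by push_cast; ring
        rw [hk, pvTbl_getD pairs (j + 2) j (by omega)]
        simp only [Nat.add_sub_cancel, pvS, List.range_succ, List.map_append, List.sum_append]
        simp
    rw [hr]
    have h1 : ((k : Int) + 1 + 1) = (((k + 1 : Nat) : Int) + 1) := by push_cast; ring
    have h2 : ((k : Int) + 1 + ((m + 1 : Nat) : Int)) = (((k + 1 : Nat) : Int) + 1 + (m : Int)) := by push_cast; ring
    rw [h1, h2, ih (k + 1)]
    congr 1
    omega

-- ===== VERDICT (by name: the statement is the Claim_ definition above) =====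
theorem get_total_rabbit_num_spec : Claim_equal_get_total_rabbit_num := by
  intro months pairs _
  unfold Spec_get_total_rabbit_num get_total_rabbit_num get_total_rabbit_num_alt
  rcases le_or_gt months 0 with h | h
  · rw [PySem.List.pyRange_one_eq_nil (by omega)]
    rfl
  · obtain ⟨n, rfl⟩ : ∃ n : Nat, months = (n : Int) := ⟨months.toNat, (Int.toNat_of_nonneg (by omega)).symm⟩
    rw [pvA_fold]
    have hb := pvB_go pairs n 0
    norm_num [show pvTbl pairs 0 = PySem.Dict.empty from rfl, pvS] at hb
    rw [show ((n : Int) + 1) = (1 + (n : Int)) by ring]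
    rw [hb]
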